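-- pv_equiv track=rewrite | github.com/MachidelPino/introduccion-a-la-programacion | Python/practica7.py | lista_con_ceros
-- ===== SOURCE A (Python) =====
-- def lista_con_ceros(s: list) -> list:
--     par: int = 0
--     for i in s:
--         if(par%2 == 0):
--             s[par] = 0
--             par += 1
--         else:
--             par += 1
--     return s
-- ===== SOURCE B (Python) =====
-- def lista_con_ceros(s: list) -> list:
--     s[::2] = [0] * ((len(s) + 1) // 2)
--     return s
-- ===== Notes on version B (the rewrite author's own statement) =====
-- stated objective: idiomatic
-- what changed: Replaces the indexed loop with a parity branch by a single bulk extended-slice assignment of a zero-filled list onto the even-index slice, still mutating the list in place.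
import Mathlib
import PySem

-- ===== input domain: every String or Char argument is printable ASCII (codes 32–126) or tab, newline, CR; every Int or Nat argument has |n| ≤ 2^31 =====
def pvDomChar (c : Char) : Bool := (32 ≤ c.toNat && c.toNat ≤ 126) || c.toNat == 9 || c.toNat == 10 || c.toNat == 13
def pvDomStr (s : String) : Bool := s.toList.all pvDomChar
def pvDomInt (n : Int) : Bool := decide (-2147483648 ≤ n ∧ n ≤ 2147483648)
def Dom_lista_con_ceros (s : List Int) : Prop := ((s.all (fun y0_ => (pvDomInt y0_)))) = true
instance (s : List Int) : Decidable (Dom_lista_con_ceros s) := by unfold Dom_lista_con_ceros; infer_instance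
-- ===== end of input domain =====

-- B zeroes the even indices with one bulk slice assignment (pairwise recursion here) instead of
-- A's indexed loop with a parity branch; both Pythons mutate the list in place, so the in-place
-- side effect is identical and the equivalence proved is about the returned value.

-- ===== PORT A =====
-- A's loop: iterate over the elements (element itself unused), counter par; when par is even,
-- set position par to 0; par increments either way.  State = (current list, par).
def lista_con_ceros_step (st : List Int × Int) (_i : Int) : List Int × Int :=
  if st.2 % 2 == 0 then (st.1.set st.2.toNat 0, st.2 + 1) else (st.1, st.2 + 1)

def lista_con_ceros (s : List Int) : List Int :=
  (s.foldl lista_con_ceros_step (s, 0)).1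

-- ===== PORT B =====
-- Source B's  s[::2] = [0] * ((len(s)+1)//2) : replace every element at an even index by 0,
-- transcribed as recursion two elements at a time.
def lista_con_ceros_alt (s : List Int) : List Int :=
  match s with
  | [] => []
  | [_] => [0]
  | _ :: b :: t => 0 :: b :: lista_con_ceros_alt t

-- ===== PRECONDITION & SPEC =====
def Spec_lista_con_ceros (s : List Int) (out : List Int) : Prop := out = lista_con_ceros_alt s
instance (s : List Int) (out : List Int) : Decidable (Spec_lista_con_ceros s out) := by unfold Spec_lista_con_ceros; infer_instance

-- ===== CLAIM (what is proved, stated in full; the proofs are below) =====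
def Claim_equal_lista_con_ceros : Prop := ∀ (s : List Int), Dom_lista_con_ceros s → Spec_lista_con_ceros s (lista_con_ceros s)

-- ===== LEMMAS AND PROOFS =====

-- The loop body ignores the element, so the fold depends only on the length of the traversed list.
def lista_iterN : Nat → (List Int × Int) → (List Int × Int)
  | 0, st => st
  | n + 1, st => lista_iterN n (lista_con_ceros_step st 0)

theorem foldl_eq_iterN (ys : List Int) (st : List Int × Int) :
    ys.foldl lista_con_ceros_step st = lista_iterN ys.length st := by
  induction ys generalizing st with
  | nil => rfl
  | cons y ys ih =>
    simp only [List.foldl_cons, List.length_cons, lista_iterN]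
    exact ih _

theorem set_append_len (pre l : List Int) (v : Int) :
    (pre ++ l).set pre.length v = pre ++ l.set 0 v := by
  induction pre with
  | nil => rfl
  | cons a pre ih => simp [ih]

theorem iterN_main (l : List Int) : ∀ (pre : List Int), pre.length % 2 = 0 →
    (lista_iterN l.length (pre ++ l, (pre.length : Int))).1 = pre ++ lista_con_ceros_alt l := by
  induction l using lista_con_ceros_alt.induct with
  | case1 => intro pre _; simp [lista_iterN, lista_con_ceros_alt]
  | case2 a =>
    intro pre hpar
    have heq : (((pre.length : Int)) % 2 == 0) = true := by
      simp only [beq_iff_eq]; omega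
    simp only [List.length_cons, List.length_nil, lista_iterN, lista_con_ceros_step, heq,
      Int.toNat_natCast, if_true]
    rw [set_append_len]
    simp [lista_con_ceros_alt]
  | case3 a b t ih =>
    intro pre hpar
    have heq : (((pre.length : Int)) % 2 == 0) = true := by
      simp only [beq_iff_eq]; omega
    have hodd : ((((pre.length : Int)) + 1) % 2 == 0) = false := by
      simp only [beq_eq_false_iff_ne, ne_eq]; omega
    have s1 : lista_con_ceros_step (pre ++ a :: b :: t, (pre.length : Int)) 0
        = (pre ++ 0 :: b :: t, (pre.length : Int) + 1) := by
      simp only [lista_con_ceros_step, heq, if_true, Int.toNat_natCast, set_append_len]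
      rfl
    have s2 : lista_con_ceros_step (pre ++ 0 :: b :: t, (pre.length : Int) + 1) 0
        = (pre ++ 0 :: b :: t, (pre.length : Int) + 1 + 1) := by
      simp [lista_con_ceros_step, hodd]
    have hlen2 : (((pre ++ [0, b]).length : Nat) : Int) = (pre.length : Int) + 1 + 1 := by
      simp; omega
    have hih := ih (pre ++ [0, b]) (by simp; omega)
    rw [hlen2] at hih
    simp only [List.append_assoc, List.cons_append, List.nil_append] at hih
    simp only [List.length_cons, lista_iterN, s1, s2, lista_con_ceros_alt]
    exact hih

-- ===== VERDICT (by name: the statement is the Claim_ definition above) =====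
theorem lista_con_ceros_spec : Claim_equal_lista_con_ceros := by
  intro s _
  unfold Spec_lista_con_ceros lista_con_ceros
  rw [foldl_eq_iterN]
  have := iterN_main s [] (by simp)
  simpa using this
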